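-- pv_equiv track=rewrite | github.com/hdonghun/Algorithm | 프로그래머스/0/120812. 최빈값 구하기/최빈값 구하기.py | solution
-- ===== SOURCE A (Python) =====
-- def solution(array):
--     from collections import Counter
--
--     # 1. 배열에서 각 숫자의 등장 횟수를 센다
--     counter = Counter(array)
--
--     # 2. 등장 횟수 중 가장 큰 값을 구한다 (최빈값의 빈도수)
--     max_freq = max(counter.values())
--
--     # 3. 가장 많이 등장한 숫자(최빈값 후보)를 수동으로 찾는다
--     most_common = []
--     for k, v in counter.items():
--         if v == max_freq:
--             most_common.append(k)
--
--     # 4. 최빈값이 여러 개이면 -1 반환, 아니면 그 값을 반환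
--     if len(most_common) > 1:
--         return -1
--     else:
--         return most_common[0]
-- ===== SOURCE B (Python) =====
-- def solution(array):
--     arr = sorted(array)
--     run = 0
--     prev = None
--     best_len = 0
--     best_val = -1
--     ties = 0
--     for x in arr:
--         if prev == x:
--             run += 1
--         else:
--             run = 1
--             prev = x
--         if run > best_len:
--             best_len = run
--             best_val = x
--             ties = 1
--         elif run == best_len:
--             ties += 1
--     return best_val if ties == 1 else -1
-- ===== Notes on version B (the rewrite author's own statement) =====
-- stated objective: alternative
-- what changed: Replaced the Counter dictionary + max + second scan over items by sorting the array and a single run-length scan over the sorted copy that tracks the best run length, its value and how many runs tie for the maximum.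
-- crash fix: On the empty list A raises ValueError (max() of an empty sequence); B's scan leaves zero ties and returns -1. — e.g. on solution([]): A raises ValueError, B returns -1
import Mathlib
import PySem

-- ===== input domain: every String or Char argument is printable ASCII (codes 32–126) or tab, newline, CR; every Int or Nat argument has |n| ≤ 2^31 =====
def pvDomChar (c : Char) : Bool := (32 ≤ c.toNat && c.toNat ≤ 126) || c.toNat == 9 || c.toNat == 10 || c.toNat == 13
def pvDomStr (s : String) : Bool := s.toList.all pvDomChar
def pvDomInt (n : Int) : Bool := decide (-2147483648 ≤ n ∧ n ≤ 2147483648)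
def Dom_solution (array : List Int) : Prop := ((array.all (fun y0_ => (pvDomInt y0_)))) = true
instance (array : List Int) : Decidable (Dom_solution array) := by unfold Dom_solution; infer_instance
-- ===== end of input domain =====

-- B replaces A's Counter+max+item-scan by sort-then-run-length-scan; equivalence proved on nonempty lists (A raises ValueError on []).


-- ===== PORT A =====
def solution (array : List Int) : Int :=
  let counter := PySem.Dict.counter array
  match PySem.List.max? counter.values (fun v => v) with
  | none => 0  -- Python raises ValueError here (array = []; excluded by Pre_solution)
  | some maxFreq =>
    let mostCommon := counter.items.foldl
      (fun acc kv => if kv.2 = maxFreq then acc ++ [kv.1] else acc) []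
    if (mostCommon.length : Int) > 1 then -1
    else
      match PySem.List.pyGet? mostCommon 0 with
      | none => 0  -- IndexError; unreachable (maxFreq is attained, so mostCommon ≠ [])
      | some k => k

-- ===== PORT B =====
-- the body of Source B's for-loop over the sorted copy (state: run, prev, best_len, best_val, ties)
def solStep : (Int × Option Int × Int × Int × Int) → Int → Int × Option Int × Int × Int × Int
  | (run, prev, bestLen, bestVal, ties), x =>
    let run' := if prev = some x then run + 1 else 1
    let prev' := if prev = some x then prev else some x
    if run' > bestLen then (run', prev', run', x, 1)
    else if run' = bestLen then (run', prev', bestLen, bestVal, ties + 1)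
    else (run', prev', bestLen, bestVal, ties)

def solution_alt (array : List Int) : Int :=
  let arr := PySem.List.sorted array (fun x => x) false
  let s := arr.foldl solStep (0, none, 0, -1, 0)
  if s.2.2.2.2 = 1 then s.2.2.2.1 else -1

-- ===== PRECONDITION & SPEC =====
def Pre_solution (array : List Int) : Prop := array ≠ []
instance (array : List Int) : Decidable (Pre_solution array) := by unfold Pre_solution; infer_instance
def pvWitness_solution : List Int := ([1, 2, 2])

-- On the empty list A raises ValueError (max() of an empty sequence); B's scan leaves zero ties and returns -1.
def Raises_solution (array : List Int) : Prop := array = []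
instance (array : List Int) : Decidable (Raises_solution array) := by unfold Raises_solution; infer_instance
def pvRaiseWitness_solution : List Int := ([])
def pvRaiseWitnessOut_solution : Int := -1

def Spec_solution (array : List Int) (out : Int) : Prop := out = solution_alt array
instance (array : List Int) (out : Int) : Decidable (Spec_solution array out) := by unfold Spec_solution; infer_instance

-- ===== CLAIM (what is proved, stated in full; the proofs are below) =====
def Claim_equal_solution : Prop := ∀ (array : List Int), Dom_solution array → Pre_solution array → Spec_solution array (solution array)
def Claim_raises_solution : Prop := (∀ (array : List Int), Dom_solution array → Raises_solution array → ¬ Pre_solution array) ∧ (Dom_solution (pvRaiseWitness_solution) ∧ Raises_solution (pvRaiseWitness_solution) ∧ solution_alt (pvRaiseWitness_solution) = pvRaiseWitnessOut_solution)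

-- ===== LEMMAS AND PROOFS =====

-- invariant of Source B's scan over a sorted nonempty prefix t
def solInv (t : List Int) (s : Int × Option Int × Int × Int × Int) : Prop :=
  s.2.1 = some (t.getLastD 0) ∧
  s.1 = (t.count (t.getLastD 0) : Int) ∧
  s.2.2.2.1 ∈ t ∧ (t.count s.2.2.2.1 : Int) = s.2.2.1 ∧
  (∀ y ∈ t, (t.count y : Int) ≤ s.2.2.1) ∧
  s.2.2.2.2 = (((PySem.List.dedup t).countP (fun k => decide ((t.count k : Int) = s.2.2.1))) : Int)

theorem le_getLastD_of_sorted (t : List Int) (h : t.Pairwise (· ≤ ·)) :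
    ∀ y ∈ t, y ≤ t.getLastD 0 := by
  induction t with
  | nil => simp
  | cons a t ih =>
    rcases List.pairwise_cons.mp h with ⟨ha, hp⟩
    intro y hy
    cases t with
    | nil => simp_all
    | cons b t' =>
      rcases List.mem_cons.mp hy with rfl | hy'
      · calc y ≤ b := ha b (by simp)
          _ ≤ (b :: t').getLastD 0 := ih hp b (by simp)
      · exact ih hp y hy'

theorem getLastD_mem (p : List Int) (hne : p ≠ []) : p.getLastD 0 ∈ p := by
  rw [List.getLastD_eq_getLast?, List.getLast?_eq_some_getLast hne]
  exact List.getLast_mem hne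

theorem countP_eq_one_unique (l : List Int) (q : Int → Bool) (x : Int) (h : l.Nodup)
    (hx : x ∈ l) (hother : ∀ k ∈ l, k ≠ x → q k = false) (hxq : q x = true) :
    l.countP q = 1 := by
  have hperm : l.Perm (x :: l.erase x) := List.perm_cons_erase hx
  rw [hperm.countP_eq, List.countP_cons, hxq]
  have h0 : (l.erase x).countP q = 0 := by
    rw [List.countP_eq_zero]
    intro k hk
    have hkl : k ∈ l := List.mem_of_mem_erase hk
    have hkx : k ≠ x := by
      intro he; subst he
      exact (List.Nodup.not_mem_erase h) hk
    simp [hother k hkl hkx]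
  rw [h0]
  simp

theorem countP_flip_succ (l : List Int) (qn qo : Int → Bool) (x : Int) (h : l.Nodup)
    (hx : x ∈ l) (hn : qn x = true) (ho : qo x = false)
    (hagree : ∀ k ∈ l, k ≠ x → qn k = qo k) :
    l.countP qn = l.countP qo + 1 := by
  have hperm : l.Perm (x :: l.erase x) := List.perm_cons_erase hx
  rw [hperm.countP_eq, hperm.countP_eq, List.countP_cons, List.countP_cons, hn, ho]
  have heq : (l.erase x).countP qn = (l.erase x).countP qo := by
    apply List.countP_congr
    intro k hk
    have hkl : k ∈ l := List.mem_of_mem_erase hk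
    have hkx : k ≠ x := by
      intro he; subst he
      exact (List.Nodup.not_mem_erase h) hk
    rw [hagree k hkl hkx]
  rw [heq]
  simp

-- Nodup lists with the same members have the same countP
theorem countP_congr_mem_nodup (l₁ l₂ : List Int) (q : Int → Bool)
    (h₁ : l₁.Nodup) (h₂ : l₂.Nodup) (hm : ∀ x, x ∈ l₁ ↔ x ∈ l₂) :
    l₁.countP q = l₂.countP q := by
  have hperm : l₁.Perm l₂ := by
    apply List.perm_of_nodup_nodup_toFinset_eq h₁ h₂
    ext a
    simp [hm a]
  exact hperm.countP_eq q

theorem solInv_fold (t : List Int) (h : t.Pairwise (· ≤ ·)) (hne : t ≠ []) :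
    solInv t (t.foldl solStep (0, none, 0, -1, 0)) := by
  induction t using List.reverseRecOn with
  | nil => exact absurd rfl hne
  | append_singleton p x ih =>
    rcases List.pairwise_append.mp h with ⟨hp, -, hpx⟩
    have hpx' : ∀ a ∈ p, a ≤ x := fun a ha => hpx a ha x (by simp)
    have hlast' : (p ++ [x]).getLastD 0 = x := List.getLastD_concat
    have hcnt : ∀ y : Int, (p ++ [x]).count y = p.count y + if y = x then 1 else 0 := by
      intro y
      by_cases hxy : y = x
      · subst hxy; simp [List.count_append]
      · simp [List.count_append, hxy, Ne.symm hxy]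
    have hdd : PySem.List.dedup (p ++ [x]) =
        if x ∈ p then PySem.List.dedup p else PySem.List.dedup p ++ [x] := by
      simp [pysem, PySem.Set.add]
    rcases eq_or_ne p [] with rfl | hpne
    · simp only [List.nil_append, List.foldl_cons, List.foldl_nil]
      unfold solInv solStep
      simp [pysem, List.count_singleton]
    · have hI := ih hp hpne
      rw [List.foldl_append, List.foldl_cons, List.foldl_nil]
      rcases hsv : p.foldl solStep (0, none, 0, -1, 0) with ⟨run, prev, bl, bv, ties⟩
      rw [hsv] at hI
      obtain ⟨h1, h2, h3, h4, h5, h6⟩ := hI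
      simp only at h1 h2 h3 h4 h5 h6
      have hLmem : p.getLastD 0 ∈ p := getLastD_mem p hpne
      have hLx : p.getLastD 0 ≤ x := hpx' _ hLmem
      have hbl1 : 1 ≤ bl := by
        have := h5 _ h3
        have hc1 : 1 ≤ p.count bv := List.one_le_count_iff.mpr h3
        omega
      have hrun' : (if prev = some x then run + 1 else (1 : Int)) = (p.count x : Int) + 1 := by
        by_cases hxL : x = p.getLastD 0
        · rw [h1, if_pos (by rw [hxL]), h2, ← hxL]
        · have hxp : x ∉ p := by
            intro hxp
            exact hxL (le_antisymm (le_getLastD_of_sorted p hp x hxp) hLx)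
          rw [h1, if_neg (fun he => hxL (Option.some.inj he).symm)]
          simp [List.count_eq_zero.mpr hxp]
      have hcx : ((p ++ [x]).count x : Int) = (p.count x : Int) + 1 := by
        rw [hcnt]; simp
      have hcne : ∀ y : Int, y ≠ x → (p ++ [x]).count y = p.count y := by
        intro y hy; rw [hcnt]; simp [hy]
      simp only [solStep, hrun']
      have hprev' : (if prev = some x then prev else some x) = some x := by
        split_ifs with hc
        · exact hc
        · rfl
      by_cases hgt : (p.count x : Int) + 1 > bl
      · -- new strict maximum: best becomes x, ties reset to 1
        rw [if_pos hgt]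
        unfold solInv
        dsimp only
        refine ⟨by simp [hprev'], by simp, by simp, by simp, ?_, ?_⟩
        · intro y hy
          rcases List.mem_append.mp hy with hyp | hyx
          · by_cases hyx' : y = x
            · subst hyx'; simp
            · rw [hcne y hyx']
              have := h5 y hyp
              omega
          · have : y = x := by simpa using hyx
            subst this; simp
        · 
          have hone : (PySem.List.dedup (p ++ [x])).countP
              (fun k => decide (((p ++ [x]).count k : Int) = (p.count x : Int) + 1)) = 1 := by
            apply countP_eq_one_unique _ _ x (PySem.List.nodup_dedup _)
              ((PySem.List.mem_dedup _ _).mpr (by simp))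
            · intro k hk hkx
              have hkp : k ∈ p ++ [x] := (PySem.List.mem_dedup _ _).mp hk
              simp only [decide_eq_false_iff_not]
              rw [hcne k hkx]
              have hkp' : k ∈ p := by
                rcases List.mem_append.mp hkp with h' | h'
                · exact h'
                · exact absurd (by simpa using h') hkx
              have := h5 k hkp'
              omega
            · simp [hcx]
          rw [hone]
          simp
      · rw [if_neg hgt]
        have hle : (p.count x : Int) + 1 ≤ bl := by omega
        by_cases heq : (p.count x : Int) + 1 = bl
        · -- ties for the maximum: ties + 1
          rw [if_pos heq]
          unfold solInv
          dsimp only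
          have hbvx : bv ≠ x := by
            intro he; subst he
            rw [h4] at heq; omega
          refine ⟨by simp [hprev'], by simp [hcx], by simp [List.mem_append.mpr (Or.inl h3)],
            by rw [hcne bv hbvx, h4], ?_, ?_⟩
          · intro y hy
            rcases List.mem_append.mp hy with hyp | hyx
            · by_cases hyx' : y = x
              · subst hyx'; omega
              · rw [hcne y hyx']; exact h5 y hyp
            · have : y = x := by simpa using hyx
              subst this; omega
          · 
            have hstep : (PySem.List.dedup (p ++ [x])).countP
                (fun k => decide (((p ++ [x]).count k : Int) = bl)) =
                (PySem.List.dedup p).countP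
                (fun k => decide ((p.count k : Int) = bl)) + 1 := by
              have hagree : ∀ k ∈ PySem.List.dedup p, k ≠ x →
                  (decide (((p ++ [x]).count k : Int) = bl)) =
                  (decide ((p.count k : Int) = bl)) := by
                intro k _ hkx
                rw [hcne k hkx]
              rw [hdd]
              by_cases hxp : x ∈ p
              · rw [if_pos hxp]
                apply countP_flip_succ _ _ _ x (PySem.List.nodup_dedup _)
                  ((PySem.List.mem_dedup _ _).mpr hxp)
                · simp [hcx, heq]
                · simp only [decide_eq_false_iff_not]; omega
                · exact hagree
              · rw [if_neg hxp, List.countP_append]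
                have h1' : (PySem.List.dedup p).countP
                    (fun k => decide (((p ++ [x]).count k : Int) = bl)) =
                    (PySem.List.dedup p).countP
                    (fun k => decide ((p.count k : Int) = bl)) := by
                  apply List.countP_congr
                  intro k hk
                  rw [hagree k hk (fun he => hxp (he ▸ (PySem.List.mem_dedup _ _).mp hk))]
                rw [h1']
                simp [hcx, heq]
            rw [hstep, h6]
            push_cast
            ring
        · -- run below the maximum: state unchanged
          rw [if_neg heq]
          unfold solInv
          dsimp only
          have hlt : (p.count x : Int) + 1 < bl := by omega
          have hbvx : bv ≠ x := by
            intro he; subst he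
            rw [h4] at hlt; omega
          refine ⟨by simp [hprev'], by simp [hcx], by simp [List.mem_append.mpr (Or.inl h3)],
            by rw [hcne bv hbvx, h4], ?_, ?_⟩
          · intro y hy
            rcases List.mem_append.mp hy with hyp | hyx
            · by_cases hyx' : y = x
              · subst hyx'; omega
              · rw [hcne y hyx']; exact h5 y hyp
            · have : y = x := by simpa using hyx
              subst this; omega
          · 
            have hsame : (PySem.List.dedup (p ++ [x])).countP
                (fun k => decide (((p ++ [x]).count k : Int) = bl)) =
                (PySem.List.dedup p).countP
                (fun k => decide ((p.count k : Int) = bl)) := by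
              rw [hdd]
              have hagree : ∀ k ∈ PySem.List.dedup p,
                  (decide (((p ++ [x]).count k : Int) = bl)) =
                  (decide ((p.count k : Int) = bl)) := by
                intro k hk
                by_cases hkx : k = x
                · subst hkx
                  simp only [hcx]
                  have : (p.count k : Int) ≤ bl := h5 k ((PySem.List.mem_dedup _ _).mp hk)
                  simp only [decide_eq_decide]
                  omega
                · rw [hcne k hkx]
              by_cases hxp : x ∈ p
              · rw [if_pos hxp]
                exact List.countP_congr (fun k hk => by rw [hagree k hk])
              · rw [if_neg hxp, List.countP_append, List.countP_congr (fun k hk => by rw [hagree k hk])]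
                simp [hcx, hlt.ne]
            rw [hsame, h6]
  

-- ===== VERDICT (by name: the statement is the Claim_ definition above) =====
theorem solution_spec : Claim_equal_solution := by
  intro array _ hpre
  unfold Spec_solution solution solution_alt
  set t := PySem.List.sorted array (fun x => x) false with ht
  have htperm : t.Perm array := PySem.List.sorted_perm array (fun x => x) false
  have htp : t.Pairwise (· ≤ ·) := PySem.List.sorted_pairwise array (fun x => x)
  have htne : t ≠ [] := by
    rw [ht, Ne, PySem.List.sorted_eq_nil_iff]
    exact hpre
  have hcount : ∀ y : Int, t.count y = array.count y := fun y => htperm.count_eq y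
  rcases hsv : t.foldl solStep (0, none, 0, -1, 0) with ⟨run, prev, bl, bv, ties⟩
  have hI := solInv_fold t htp htne
  rw [hsv] at hI
  obtain ⟨-, -, h3, h4, h5, h6⟩ := hI
  simp only at h3 h4 h5 h6
  have hvals : (PySem.Dict.counter array).values =
      (PySem.Set.ofList array).map (fun k => (array.count k : Int)) := by
    simp only [PySem.Dict.values, PySem.Dict.items_counter, List.map_map]
    rfl
  obtain ⟨a0, rest, rfl⟩ : ∃ a0 rest, array = a0 :: rest := by
    cases array with
    | nil => exact absurd rfl hpre
    | cons a0 rest => exact ⟨a0, rest, rfl⟩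
  set array := a0 :: rest with harr
  have ha0D : a0 ∈ PySem.Set.ofList array := (PySem.Set.mem_ofList _ _).mpr (by rw [harr]; exact List.mem_cons_self ..)
  dsimp only
  rcases hM : PySem.List.max? (PySem.Dict.counter array).values (fun v => v) with _ | M
  · exfalso
    rw [PySem.List.max?_eq_none_iff, hvals, List.map_eq_nil_iff] at hM
    rw [hM] at ha0D
    exact absurd ha0D (List.not_mem_nil)
  · rw [hsv]
    dsimp only
    have hMmem := PySem.List.max?_mem hM
    have hMmax := PySem.List.max?_isMax hM
    rw [hvals] at hMmem
    obtain ⟨k0, hk0D, hk0M⟩ := List.mem_map.mp hMmem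
    have hmaxc : ∀ y ∈ array, (array.count y : Int) ≤ M := by
      intro y hy
      have hyD : y ∈ PySem.Set.ofList array := (PySem.Set.mem_ofList _ _).mpr hy
      have : (array.count y : Int) ∈ (PySem.Dict.counter array).values := by
        rw [hvals]; exact List.mem_map.mpr ⟨y, hyD, rfl⟩
      exact hMmax _ this
  -- bl = M
    have hblM : bl = M := by
      apply le_antisymm
      · have hbva : bv ∈ array := htperm.mem_iff.mp h3
        rw [← h4, hcount]
        exact hmaxc bv hbva
      · have hk0t : k0 ∈ t := htperm.mem_iff.mpr ((PySem.Set.mem_ofList _ _).mp hk0D)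
        have := h5 k0 hk0t
        rw [hcount] at this
        omega
    simp only [PySem.List.foldl_append_ite (fun kv : Int × Int => kv.2 = M) (fun kv : Int × Int => kv.1)]
    rw [PySem.Dict.items_counter]
    have hMost : (((PySem.Set.ofList array).map (fun k => (k, (array.count k : Int)))).filter
        (fun kv => decide (kv.2 = M))).map (fun kv => kv.1) =
        (PySem.Set.ofList array).filter (fun k => decide ((array.count k : Int) = M)) := by
      rw [List.filter_map, List.map_map]
      simp [Function.comp_def]
    rw [List.nil_append, hMost]
    set D := PySem.Set.ofList array with hD
    set q : Int → Bool := fun k => decide ((array.count k : Int) = M) with hq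
    have hties : ties = ((D.countP q : Nat) : Int) := by
      rw [h6]
      congr 1
      have hqq : (fun k => decide ((t.count k : Int) = bl)) = q := by
        funext k
        rw [hq, hcount k, hblM]
      rw [hqq]
      apply countP_congr_mem_nodup _ _ _ (PySem.List.nodup_dedup t)
      · rw [hD]; exact PySem.Set.nodup_ofList array
      · intro y
        rw [PySem.List.mem_dedup, hD, PySem.Set.mem_ofList, htperm.mem_iff]
    have hk0f : k0 ∈ D.filter q := List.mem_filter.mpr ⟨hk0D, by rw [hq]; simp [← hk0M]⟩
    have hlen1 : 1 ≤ (D.filter q).length := List.length_pos_of_mem hk0f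
    have hcplen : D.countP q = (D.filter q).length := List.countP_eq_length_filter
    by_cases hgt1 : ((D.filter q).length : Int) > 1
    · rw [if_pos hgt1]
      have hne1 : ¬ (ties = 1) := by
        rw [hties, hcplen]
        omega
      rw [if_neg hne1]
    · rw [if_neg hgt1]
      have hlone : (D.filter q).length = 1 := by omega
      obtain ⟨k, hk⟩ := List.length_eq_one_iff.mp hlone
      have hbvf : bv ∈ D.filter q := by
        apply List.mem_filter.mpr
        refine ⟨(PySem.Set.mem_ofList _ _).mpr (htperm.mem_iff.mp h3), ?_⟩
        rw [hq]
        simp only [decide_eq_true_eq]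
        rw [← hcount, h4, hblM]
      have hbvk : bv = k := by
        rw [hk] at hbvf
        simpa using hbvf
      have h1 : ties = 1 := by
        rw [hties, hcplen, hlone]
        rfl
      rw [if_pos h1, hk]
      simp [PySem.List.pyGet?, PySem.List.pyIdx?, hbvk]

@[simp] theorem solution_raises : Claim_raises_solution := by
  unfold Claim_raises_solution
  exact ⟨fun a _ hr hp => hp hr, by decide⟩
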